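-- pv_equiv track=rewrite | github.com/koii-network/prometheus-beta | src/fibonacci_sum_sequence.py | generate_fibonacci_sum_sequence
-- ===== SOURCE A (Python) =====
-- def generate_fibonacci_sum_sequence(n: int, k: int) -> list:
--     """
--     Generate a Fibonacci-like sequence with specific constraints.
--
--     Args:
--         n (int): Maximum length of the sequence
--         k (int): Minimum sum of consecutive numbers
--
--     Returns:
--         list: A sequence of numbers meeting the specified constraints
--
--     Raises:
--         ValueError: If n or k is negative
--     """
--     # Validate input parameters
--     if n < 0 or k < 0:
--         raise ValueError("Both n and k must be non-negative integers")
--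
--     # Handle trivial cases
--     if n == 0:
--         return []
--
--     # Initialize the sequence with first number
--     if k == 0:
--         sequence = [0]
--     else:
--         sequence = [max(1, k // 2)]
--
--     # Generate sequence
--     while len(sequence) < n:
--         # Compute the next number based on sum constraint
--         next_num = max(sequence[-1] + 1, k - sequence[-1])
--
--         # Stop if we can't generate a valid next number
--         if sum(sequence[-2:]) < k and len(sequence) > 1:
--             break
--
--         sequence.append(next_num)
--
--     return sequence
-- ===== SOURCE B (Python) =====
-- def generate_fibonacci_sum_sequence(n: int, k: int) -> list:
--     """Closed-form: the sequence is arithmetic with step 1 from its start value."""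
--     if n < 0 or k < 0:
--         raise ValueError("Both n and k must be non-negative integers")
--     start = 0 if k == 0 else max(1, k // 2)
--     return [start + i for i in range(n)]
-- ===== Notes on version B (the rewrite author's own statement) =====
-- stated objective: simpler
-- what changed: B replaces A's while-loop over the recurrence (max of prev+1 and k-prev, with a break guard that slices and sums the last two elements each iteration) by the closed-form arithmetic list [start + i for i in range(n)], after proving the max always picks prev+1 and the break never fires for n,k >= 0.
import Mathlib
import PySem

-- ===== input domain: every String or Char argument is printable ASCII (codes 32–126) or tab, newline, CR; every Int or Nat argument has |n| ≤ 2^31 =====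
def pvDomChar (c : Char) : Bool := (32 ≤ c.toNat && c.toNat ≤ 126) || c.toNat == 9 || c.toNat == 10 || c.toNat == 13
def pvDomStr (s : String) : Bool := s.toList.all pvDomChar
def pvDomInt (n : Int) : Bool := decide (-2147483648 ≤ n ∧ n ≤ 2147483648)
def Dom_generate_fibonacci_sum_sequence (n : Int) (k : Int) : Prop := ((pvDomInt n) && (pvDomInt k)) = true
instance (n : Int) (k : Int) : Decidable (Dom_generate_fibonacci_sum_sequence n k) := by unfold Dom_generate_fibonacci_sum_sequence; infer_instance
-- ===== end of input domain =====

-- B computes the same sequence in closed form ([start + i for i in range(n)]) instead of A's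
-- recurrence loop; the equivalence proof shows A's max-branch and break are never taken.

-- ===== PORT A =====
-- the 'while len(sequence) < n' loop; fuel bounds the iterations (each one appends, so n.toNat is enough)
def pvLoopA (n : Int) (k : Int) : Nat → List Int → List Int
  | 0, seq => seq
  | f + 1, seq =>
    if (seq.length : Int) < n then
      -- sequence[-1]: seq is always nonempty here, so the default is never read
      let prev := PySem.List.pyGetD seq (-1) 0
      let next_num := max (prev + 1) (k - prev)
      if (PySem.List.slice seq (some (-2)) none).sum < k ∧ 1 < seq.length then seq
      else pvLoopA n k f (seq ++ [next_num])
    else seq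

def generate_fibonacci_sum_sequence (n : Int) (k : Int) : List Int :=
  if n = 0 then []
  else
    let sequence := if k = 0 then [0] else [max 1 (PySem.Int.floordiv k 2)]
    pvLoopA n k n.toNat sequence

-- ===== PORT B =====
def generate_fibonacci_sum_sequence_alt (n : Int) (k : Int) : List Int :=
  let start := if k = 0 then 0 else max 1 (PySem.Int.floordiv k 2)
  (PySem.List.pyRange 0 n 1).map (fun i => start + i)

-- ===== PRECONDITION & SPEC =====
-- A raises ValueError when n < 0 or k < 0; those inputs are excluded (B raises there too).
def Pre_generate_fibonacci_sum_sequence (n : Int) (k : Int) : Prop := 0 ≤ n ∧ 0 ≤ k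
instance (n : Int) (k : Int) : Decidable (Pre_generate_fibonacci_sum_sequence n k) := by unfold Pre_generate_fibonacci_sum_sequence; infer_instance
def pvWitness_generate_fibonacci_sum_sequence : Int × Int := (3, 5)

def Spec_generate_fibonacci_sum_sequence (n : Int) (k : Int) (out : List Int) : Prop := out = generate_fibonacci_sum_sequence_alt n k
instance (n : Int) (k : Int) (out : List Int) : Decidable (Spec_generate_fibonacci_sum_sequence n k out) := by unfold Spec_generate_fibonacci_sum_sequence; infer_instance

-- ===== CLAIM (what is proved, stated in full; the proofs are below) =====
def Claim_equal_generate_fibonacci_sum_sequence : Prop := ∀ (n : Int) (k : Int), Dom_generate_fibonacci_sum_sequence n k → Pre_generate_fibonacci_sum_sequence n k → Spec_generate_fibonacci_sum_sequence n k (generate_fibonacci_sum_sequence n k)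

-- ===== LEMMAS AND PROOFS; VERDICT at the bottom =====

-- Loop invariant: starting from the arithmetic prefix of length m (m ≥ 1) with start value s
-- satisfying k ≤ 2*s + 1, the loop extends it to the arithmetic list of length max m n.toNat.
lemma pvLoopA_arith (n k s : Int) (hn : 0 ≤ n) (hks : k ≤ 2 * s + 1) :
    ∀ (f m : Nat), 1 ≤ m → n.toNat ≤ m + f →
      pvLoopA n k f ((List.range m).map (fun i : Nat => s + (i : Int))) =
        (List.range (max m n.toNat)).map (fun i : Nat => s + (i : Int)) := by
  intro f
  induction f with
  | zero =>
    intro m hm hf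
    have : max m n.toNat = m := by omega
    simp [pvLoopA, this]
  | succ f ih =>
    intro m hm hf
    obtain ⟨mm, rfl⟩ : ∃ mm, m = mm + 1 := ⟨m - 1, by omega⟩
    simp only [pvLoopA]
    by_cases hlt : ((((List.range (mm+1)).map (fun i : Nat => s + (i : Int))).length : Int) < n)
    · rw [if_pos hlt]
      have hlen : ((List.range (mm+1)).map (fun i : Nat => s + (i : Int))).length = mm + 1 := by simp
      rw [hlen] at hlt
      have hmn : mm + 1 < n.toNat := by omega
      have hprev : PySem.List.pyGetD ((List.range (mm+1)).map (fun i : Nat => s + (i : Int))) (-1) 0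
          = s + mm := by
        rw [List.range_succ, List.map_append, List.map_singleton,
          PySem.List.pyGetD_neg_one_append_singleton]
      rw [hprev]
      have hbreak : ¬ ((PySem.List.slice ((List.range (mm+1)).map (fun i : Nat => s + (i : Int))) (some (-2)) none).sum < k
            ∧ 1 < ((List.range (mm+1)).map (fun i : Nat => s + (i : Int))).length) := by
        rcases Nat.eq_zero_or_pos mm with h0 | hpos
        · subst h0; intro h; have := h.2; simp at this
        · obtain ⟨mm', rfl⟩ : ∃ mm', mm = mm' + 1 := ⟨mm - 1, by omega⟩
          have h2 : (List.range (mm' + 1 + 1)).map (fun i : Nat => s + (i : Int))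
              = (List.range mm').map (fun i : Nat => s + (i : Int)) ++ [s + mm', s + (mm' + 1)] := by
            rw [List.range_succ, List.range_succ]; simp
          rw [h2, PySem.List.slice_from_neg_ofNat _ 2 (by omega)]
          have hlen2 : (((List.range mm').map (fun i : Nat => s + (i : Int))) ++ [s + (mm':Int), s + ((mm':Int) + 1)]).length
              = mm' + 2 := by simp
          rw [hlen2]
          have hdrop : (((List.range mm').map (fun i : Nat => s + (i : Int))) ++ [s + (mm':Int), s + ((mm':Int) + 1)]).drop (mm' + 2 - 2)
              = [s + (mm':Int), s + ((mm':Int) + 1)] := by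
            have he : mm' + 2 - 2 = ((List.range mm').map (fun i : Nat => s + (i : Int))).length := by simp
            rw [he, List.drop_left]
          rw [hdrop]
          intro h
          have := h.1
          simp at this
          omega
      rw [if_neg hbreak]
      have hmax : max (s + (mm:Int) + 1) (k - (s + (mm:Int))) = s + ((mm:Int) + 1) := by
        have : k - (s + (mm:Int)) ≤ s + (mm:Int) + 1 := by omega
        rw [max_eq_left this]; ring
      rw [hmax]
      have happ : (List.range (mm+1)).map (fun i : Nat => s + (i : Int)) ++ [s + ((mm:Int) + 1)]
          = (List.range (mm+2)).map (fun i : Nat => s + (i : Int)) := by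
        rw [List.range_succ (n := mm + 1)]; simp
      rw [happ, ih (mm + 2) (by omega) (by omega)]
      have hmx : max (mm + 2) n.toNat = max (mm + 1) n.toNat := by omega
      rw [hmx]
    · rw [if_neg hlt]
      have hlen : ((List.range (mm+1)).map (fun i : Nat => s + (i : Int))).length = mm + 1 := by simp
      rw [hlen] at hlt
      have : max (mm + 1) n.toNat = mm + 1 := by omega
      rw [this]

theorem generate_fibonacci_sum_sequence_spec : Claim_equal_generate_fibonacci_sum_sequence := by
  intro n k _ hpre
  obtain ⟨hn, hk⟩ := hpre
  unfold Spec_generate_fibonacci_sum_sequence generate_fibonacci_sum_sequence generate_fibonacci_sum_sequence_alt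
  set s : Int := if k = 0 then 0 else max 1 (PySem.Int.floordiv k 2) with hs
  have hks : k ≤ 2 * s + 1 := by
    rcases eq_or_ne k 0 with h0 | h0
    · simp [hs, h0]
    · have hdiv : PySem.Int.floordiv k 2 = k / 2 := PySem.Int.floordiv_eq_ediv_of_pos (by omega)
      have h2 : 2 * (k / 2) + 1 ≥ k := by omega
      simp only [hs, if_neg h0, hdiv]
      have := le_max_right (1:Int) (k / 2)
      omega
  by_cases h0 : n = 0
  · simp [h0]
  · rw [if_neg h0]
    have hinit : (if k = 0 then ([0] : List Int) else [max 1 (PySem.Int.floordiv k 2)])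
        = (List.range 1).map (fun i : Nat => s + (i : Int)) := by
      rcases eq_or_ne k 0 with hk0 | hk0 <;> simp [hs, hk0]
    rw [hinit, pvLoopA_arith n k s hn hks n.toNat 1 (by omega) (by omega)]
    have hm1 : max 1 n.toNat = n.toNat := by omega
    rw [hm1, PySem.List.pyRange_one, List.map_map]
    simp
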